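-- pv_equiv track=rewrite | github.com/TheCharlatan/PHY125 | week7/pascal.py | blank_triangle
-- ===== SOURCE A (Python) =====
-- def blank_triangle(n):
--   """Gives Pascal's triangle with all zeros.
--   n: Integer
--      Levels of the triiangle to be computed"""
--   PascalTri = list((n+1)*[[0]])
--   for i in range(n):
--     PrevRow = PascalTri[i]
--     NewRow = list([0])
--     for j in range(len(PrevRow)):
--       if j+1 == len(PrevRow):
--         NewRow.append(0)
--       else:
--         NewRow.append(0)
--     PascalTri[i+1] = NewRow
--   return PascalTri
-- ===== SOURCE B (Python) =====
-- def blank_triangle(n):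
--   """Gives Pascal's triangle with all zeros.
--   n: Integer
--      Levels of the triiangle to be computed"""
--   return [[0] * (i + 1) for i in range(n + 1)]
-- ===== Notes on version B (the rewrite author's own statement) =====
-- stated objective: simpler
-- what changed: Each all-zero row is built directly from its index as [0]*(i+1), instead of A's stateful recurrence that reads the previous row and extends it element by element via a redundant if/else loop.
import Mathlib
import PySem

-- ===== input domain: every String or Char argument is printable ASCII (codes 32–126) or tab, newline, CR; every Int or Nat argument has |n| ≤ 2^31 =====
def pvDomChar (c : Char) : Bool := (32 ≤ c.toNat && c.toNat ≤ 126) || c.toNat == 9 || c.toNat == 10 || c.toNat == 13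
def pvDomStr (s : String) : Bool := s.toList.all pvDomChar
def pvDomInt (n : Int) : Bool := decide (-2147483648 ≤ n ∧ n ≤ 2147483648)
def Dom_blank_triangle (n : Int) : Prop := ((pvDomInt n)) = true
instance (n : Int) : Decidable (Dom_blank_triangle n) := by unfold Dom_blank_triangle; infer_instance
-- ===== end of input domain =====

-- B replaces A's stateful previous-row recurrence by a direct per-index row construction; equivalence proved for all n.

-- ===== PORT A =====
def blank_triangle (n : Int) : List (List Int) :=
  -- PascalTri = list((n+1)*[[0]])  (Python list multiplication clamps negative counts to 0)
  let PascalTri : List (List Int) := List.replicate (n + 1).toNat [0]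
  -- for i in range(n): …  (indices 0 ≤ i < n, all reads PascalTri[i] in range, so getD's default is never used)
  (List.range n.toNat).foldl (fun tri i =>
    let PrevRow := tri[i]?.getD []
    let NewRow := (List.range PrevRow.length).foldl (fun (r : List Int) (j : Nat) =>
      if (j : Int) + 1 = (PrevRow.length : Int) then r ++ [0] else r ++ [0]) [0]
    tri.set (i + 1) NewRow) PascalTri

-- ===== PORT B =====
def blank_triangle_alt (n : Int) : List (List Int) :=
  (PySem.List.pyRange 0 (n + 1) 1).map (fun i => List.replicate (i + 1).toNat (0 : Int))

-- ===== PRECONDITION & SPEC =====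
def Spec_blank_triangle (n : Int) (out : List (List Int)) : Prop := out = blank_triangle_alt n
instance (n : Int) (out : List (List Int)) : Decidable (Spec_blank_triangle n out) := by unfold Spec_blank_triangle; infer_instance

-- ===== CLAIM (what is proved, stated in full; the proofs are below) =====
def Claim_equal_blank_triangle : Prop := ∀ (n : Int), Dom_blank_triangle n → Spec_blank_triangle n (blank_triangle n)

-- ===== LEMMAS AND PROOFS =====

/-- the final row of index `i` : `i+1` zeros -/
def pvRow (i : Nat) : List Int := List.replicate (i + 1) 0

/-- A's inner loop just appends one 0 per element counted, whatever the branch test says. -/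
theorem pv_inner_append (k : Nat) (acc : List Int) (c : Nat → Prop) [DecidablePred c] :
    (List.range k).foldl (fun (r : List Int) (j : Nat) => if c j then r ++ [0] else r ++ [0]) acc
      = acc ++ List.replicate k 0 := by
  induction k generalizing acc with
  | zero => simp
  | succ k ih =>
      rw [List.range_succ]
      simp only [List.foldl_append, List.foldl_cons, List.foldl_nil, ih]
      by_cases h : c k <;> simp [h, List.replicate_succ']

/-- A's inner loop turns a row of length `i+1` into `pvRow (i+1)`. -/
theorem pv_inner (i : Nat) :
    (List.range (pvRow i).length).foldl (fun (r : List Int) (j : Nat) =>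
      if (j : Int) + 1 = ((pvRow i).length : Int) then r ++ [0] else r ++ [0]) [0]
      = pvRow (i + 1) := by
  rw [pv_inner_append ((pvRow i).length) [0] (fun j => (j : Int) + 1 = ((pvRow i).length : Int))]
  simp [pvRow, List.replicate_succ]

/-- the loop invariant: rows `0..j` are finished, the remaining `m` slots still hold `[0]`. -/
theorem pv_loop (m j : Nat) :
    (List.range' j m).foldl (fun tri i =>
      let PrevRow := tri[i]?.getD []
      let NewRow := (List.range PrevRow.length).foldl (fun (r : List Int) (k : Nat) =>
        if (k : Int) + 1 = (PrevRow.length : Int) then r ++ [0] else r ++ [0]) [0]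
      tri.set (i + 1) NewRow)
      ((List.range (j + 1)).map pvRow ++ List.replicate m ([0] : List Int))
      = (List.range (j + 1 + m)).map pvRow := by
  induction m generalizing j with
  | zero => simp
  | succ m ih =>
      rw [List.range'_succ, List.foldl_cons]
      have hget : ((List.range (j + 1)).map pvRow ++ List.replicate (m + 1) ([0] : List Int))[j]?
          = some (pvRow j) := by
        rw [List.getElem?_append_left (by simp)]
        simp
      simp only [hget, Option.getD_some, pv_inner j]
      have hset : ((List.range (j + 1)).map pvRow ++ List.replicate (m + 1) ([0] : List Int)).set
          (j + 1) (pvRow (j + 1))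
          = (List.range (j + 2)).map pvRow ++ List.replicate m ([0] : List Int) := by
        rw [List.set_append_right _ _ (by simp)]
        simp [List.replicate_succ, List.range_succ, List.append_assoc]
      rw [hset]
      have := ih (j + 1)
      simpa [Nat.add_assoc, Nat.add_comm, Nat.add_left_comm] using this

theorem pv_A (n : Int) : blank_triangle n = (List.range (n + 1).toNat).map pvRow := by
  by_cases hn : 0 ≤ n
  · have hm : (n + 1).toNat = n.toNat + 1 := by omega
    unfold blank_triangle
    simp only [hm]
    have h0 : List.replicate (n.toNat + 1) ([0] : List Int)
        = (List.range 1).map pvRow ++ List.replicate n.toNat ([0] : List Int) := by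
      simp [pvRow, List.replicate_succ]
    rw [h0, List.range_eq_range']
    have := pv_loop n.toNat 0
    simpa [List.range_eq_range', Nat.add_comm] using this
  · have h1 : (n + 1).toNat = 0 := by omega
    have h2 : n.toNat = 0 := by omega
    unfold blank_triangle
    simp [h1, h2]

theorem pv_B (n : Int) : blank_triangle_alt n = (List.range (n + 1).toNat).map pvRow := by
  unfold blank_triangle_alt
  rw [PySem.List.pyRange_one 0 (n + 1)]
  simp only [Int.sub_zero, List.map_map]
  refine List.map_congr_left ?_
  intro k hk
  simp only [Function.comp_apply, pvRow]
  congr 1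
  omega

-- ===== VERDICT (by name: the statement is the Claim_ definition above) =====
theorem blank_triangle_spec : Claim_equal_blank_triangle := by
  intro n _
  unfold Spec_blank_triangle
  rw [pv_A, pv_B]
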